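-- pv_equiv track=rewrite | github.com/zeppeki/project-euler-first100 | problems/problem_011.py | solve_optimized
-- ===== SOURCE A (Python) =====
-- DIRECTIONS = [
--     (0, 1),  # 右
--     (1, 0),  # 下
--     (1, 1),  # 右下
--     (1, -1),  # 左下
-- ]
--
-- def is_valid_position(row: int, col: int, grid: list[list[int]]) -> bool:
--     """位置がグリッド内かどうかをチェック"""
--     return 0 <= row < len(grid) and 0 <= col < len(grid[0])
--
-- def solve_optimized(grid: list[list[int]], length: int = 4) -> int:
--     """
--     最適化解法: 境界チェックを最適化し、早期終了を活用
--     時間計算量: O(rows × cols × directions × length)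
--     空間計算量: O(1)
--     """
--     if not grid or not grid[0]:
--         return 0
--
--     rows, cols = len(grid), len(grid[0])
--     max_product = 0
--
--     # 各方向について、有効な開始位置のみをチェック
--     for direction in DIRECTIONS:
--         dr, dc = direction
--
--         # この方向で有効な開始位置の範囲を計算
--         start_rows = range(rows - (length - 1) * max(0, dr))
--         start_cols = range(cols - (length - 1) * max(0, dc))
--
--         for row in start_rows:
--             for col in start_cols:
--                 product = 1
--                 valid = True
--
--                 # 4つの隣接する数をチェック
--                 for i in range(length):
--                     r = row + i * dr
--                     c = col + i * dc
--
--                     if not is_valid_position(r, c, grid):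
--                         valid = False
--                         break
--
--                     product *= grid[r][c]
--
--                 if valid:
--                     max_product = max(max_product, product)
--
--     return max_product
-- ===== SOURCE B (Python) =====
-- def solve_optimized(grid: list[list[int]], length: int = 4) -> int:
--     """Build every 1-D line of the grid (rows, columns, both diagonal
--     families), then slide a window of `length` over each line."""
--     if not grid or not grid[0]:
--         return 0
--     rows, cols = len(grid), len(grid[0])
--     g = [row[:cols] for row in grid]
--     lines = list(g)
--     lines += [[g[r][c] for r in range(rows)] for c in range(cols)]
--     lines += [[g[r0 + k][k] for k in range(min(rows - r0, cols))] for r0 in range(rows)]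
--     lines += [[g[k][c0 + k] for k in range(min(rows, cols - c0))] for c0 in range(1, cols)]
--     lines += [[g[r0 + k][cols - 1 - k] for k in range(min(rows - r0, cols))] for r0 in range(rows)]
--     lines += [[g[k][c0 - k] for k in range(min(rows, c0 + 1))] for c0 in range(cols - 1)]
--     best = 0
--     for line in lines:
--         for i in range(len(line) - length + 1):
--             p = 1
--             for j in range(i, i + length):
--                 p *= line[j]
--             best = max(best, p)
--     return best
-- ===== Notes on version B (the rewrite author's own statement) =====
-- stated objective: alternative
-- what changed: B first materialises every 1-D line of the grid (rows, columns and both diagonal families) and then slides a product window over each line, instead of A's per-start-cell stepping in each of the four directions with an in-bounds check and break.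
-- outside the precondition, e.g. on solve_optimized([[1, 2], [3]], 3): A returns 0, B raises IndexError
import Mathlib
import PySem

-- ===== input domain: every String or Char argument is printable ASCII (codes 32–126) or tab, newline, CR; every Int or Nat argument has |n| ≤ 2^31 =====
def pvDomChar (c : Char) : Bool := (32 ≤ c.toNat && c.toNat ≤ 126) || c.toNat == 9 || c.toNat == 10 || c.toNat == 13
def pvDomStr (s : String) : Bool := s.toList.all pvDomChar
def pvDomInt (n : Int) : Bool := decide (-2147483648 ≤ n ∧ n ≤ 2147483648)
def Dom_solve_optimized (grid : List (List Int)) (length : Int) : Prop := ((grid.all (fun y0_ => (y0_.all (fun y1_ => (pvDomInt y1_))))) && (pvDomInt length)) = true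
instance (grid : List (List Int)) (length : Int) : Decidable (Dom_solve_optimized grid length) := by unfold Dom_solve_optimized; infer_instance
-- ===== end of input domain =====

-- B replaces A's per-start-cell directional stepping (with an in-bounds check and break) by
-- materialising every 1-D line of the grid (rows, columns, both diagonal families) and sliding a
-- product window over each line; equivalence of the return value is proved on rectangular-enough grids.

-- ===== PORT A =====
-- grid[r][c] after a successful bounds check (both indices nonnegative and in range there)
def pyCell (grid : List (List Int)) (r c : Int) : Int :=
  (PySem.List.pyGet? ((PySem.List.pyGet? grid r).getD []) c).getD 0

def is_valid_position (row col : Int) (grid : List (List Int)) : Bool :=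
  decide (0 ≤ row ∧ row < (grid.length : Int) ∧ 0 ≤ col ∧ col < ((grid.headD []).length : Int))

-- the inner 'for i in range(length)' loop of A, with its early break on an invalid position
def innerLoopA (grid : List (List Int)) (row col dr dc : Int) :
    List Int → Int → Int × Bool
  | [], product => (product, true)
  | i :: rest, product =>
      let r := row + i * dr
      let c := col + i * dc
      if is_valid_position r c grid then
        innerLoopA grid row col dr dc rest (product * pyCell grid r c)
      else
        (product, false)

def solve_optimized (grid : List (List Int)) (length : Int) : Int :=
  if grid = [] ∨ grid.headD [] = [] then 0
  else
    let rows : Int := grid.length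
    let cols : Int := (grid.headD []).length
    ([(0, 1), (1, 0), (1, 1), (1, -1)] : List (Int × Int)).foldl
      (fun maxProduct dir =>
        let dr := dir.1
        let dc := dir.2
        let startRows := PySem.List.pyRange 0 (rows - (length - 1) * max 0 dr) 1
        let startCols := PySem.List.pyRange 0 (cols - (length - 1) * max 0 dc) 1
        startRows.foldl (fun mp row =>
          startCols.foldl (fun mp col =>
            let pv := innerLoopA grid row col dr dc (PySem.List.pyRange 0 length 1) 1
            if pv.2 then max mp pv.1 else mp) mp) maxProduct)
      0

-- ===== PORT B =====
-- the window-product loop of B: 'p = 1; for j in range(i, i + length): p *= line[j]'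
def windowProd (line : List Int) (i length : Int) : Int :=
  (PySem.List.pyRange i (i + length) 1).foldl
    (fun p j => p * (PySem.List.pyGet? line j).getD 0) 1

def solve_optimized_alt (grid : List (List Int)) (length : Int) : Int :=
  if grid = [] ∨ grid.headD [] = [] then 0
  else
    let rows : Int := grid.length
    let cols : Int := (grid.headD []).length
    let g : List (List Int) := grid.map (fun row => PySem.List.slice row (some 0) (some cols))
    let lines : List (List Int) :=
      g
      ++ (PySem.List.pyRange 0 cols 1).map (fun c =>
            (PySem.List.pyRange 0 rows 1).map (fun r => pyCell g r c))
      ++ (PySem.List.pyRange 0 rows 1).map (fun r0 =>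
            (PySem.List.pyRange 0 (min (rows - r0) cols) 1).map (fun k => pyCell g (r0 + k) k))
      ++ (PySem.List.pyRange 1 cols 1).map (fun c0 =>
            (PySem.List.pyRange 0 (min rows (cols - c0)) 1).map (fun k => pyCell g k (c0 + k)))
      ++ (PySem.List.pyRange 0 rows 1).map (fun r0 =>
            (PySem.List.pyRange 0 (min (rows - r0) cols) 1).map (fun k => pyCell g (r0 + k) (cols - 1 - k)))
      ++ (PySem.List.pyRange 0 (cols - 1) 1).map (fun c0 =>
            (PySem.List.pyRange 0 (min rows (c0 + 1)) 1).map (fun k => pyCell g k (c0 - k)))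
    lines.foldl (fun best line =>
      (PySem.List.pyRange 0 ((line.length : Int) - length + 1) 1).foldl
        (fun best i => max best (windowProd line i length)) best) 0

-- ===== PRECONDITION & SPEC =====
-- Pre_ excludes grids in which some row is shorter than the first row: A fixes the width from the
-- first row and raises IndexError on most such grids (where it does return, missing cells were
-- silently never visited), while B's line construction raises there.
def Pre_solve_optimized (grid : List (List Int)) (length : Int) : Prop :=
  ∀ row ∈ grid, (grid.headD []).length ≤ row.length
instance (grid : List (List Int)) (length : Int) : Decidable (Pre_solve_optimized grid length) := by
  unfold Pre_solve_optimized; infer_instance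

def pvWitness_solve_optimized : List (List Int) × Int := ([[1, 2], [3, 4]], 2)

def Spec_solve_optimized (grid : List (List Int)) (length : Int) (out : Int) : Prop := out = solve_optimized_alt grid length
instance (grid : List (List Int)) (length : Int) (out : Int) : Decidable (Spec_solve_optimized grid length out) := by unfold Spec_solve_optimized; infer_instance

-- ===== CLAIM (what is proved, stated in full; the proofs are below) =====
def Claim_equal_solve_optimized : Prop := ∀ (grid : List (List Int)) (length : Int), Dom_solve_optimized grid length → Pre_solve_optimized grid length → Spec_solve_optimized grid length (solve_optimized grid length)

-- ===== LEMMAS AND PROOFS =====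

-- the product of the `length` cells starting at (r, c) and stepping by (dr, dc)
def segProd (grid : List (List Int)) (dr dc r c L : Int) : Int :=
  (List.range L.toNat).foldl (fun p (k : Nat) => p * pyCell grid (r + (k : Int) * dr) (c + (k : Int) * dc)) 1

-- A's candidate products, as one flat list (per direction: valid starts, path products)
def LA (grid : List (List Int)) (L : Int) : List Int :=
  ([(0, 1), (1, 0), (1, 1), (1, -1)] : List (Int × Int)).flatMap (fun dir =>
    (PySem.List.pyRange 0 ((grid.length : Int) - (L - 1) * max 0 dir.1) 1).flatMap (fun row =>
      ((PySem.List.pyRange 0 (((grid.headD []).length : Int) - (L - 1) * max 0 dir.2) 1).filter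
        (fun col => (innerLoopA grid row col dir.1 dir.2 (PySem.List.pyRange 0 L 1) 1).2)).map
        (fun col => (innerLoopA grid row col dir.1 dir.2 (PySem.List.pyRange 0 L 1) 1).1)))

-- B's candidate products: every window product of every line
def LB (grid : List (List Int)) (L : Int) : List Int :=
  ((grid.map (fun row => PySem.List.slice row (some 0) (some ((grid.headD []).length : Int))))
    ++ (PySem.List.pyRange 0 ((grid.headD []).length : Int) 1).map (fun c =>
          (PySem.List.pyRange 0 ((grid.length : Int)) 1).map (fun r =>
            pyCell (grid.map (fun row => PySem.List.slice row (some 0) (some ((grid.headD []).length : Int)))) r c))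
    ++ (PySem.List.pyRange 0 ((grid.length : Int)) 1).map (fun r0 =>
          (PySem.List.pyRange 0 (min ((grid.length : Int) - r0) ((grid.headD []).length : Int)) 1).map (fun k =>
            pyCell (grid.map (fun row => PySem.List.slice row (some 0) (some ((grid.headD []).length : Int)))) (r0 + k) k))
    ++ (PySem.List.pyRange 1 ((grid.headD []).length : Int) 1).map (fun c0 =>
          (PySem.List.pyRange 0 (min ((grid.length : Int)) (((grid.headD []).length : Int) - c0)) 1).map (fun k =>
            pyCell (grid.map (fun row => PySem.List.slice row (some 0) (some ((grid.headD []).length : Int)))) k (c0 + k)))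
    ++ (PySem.List.pyRange 0 ((grid.length : Int)) 1).map (fun r0 =>
          (PySem.List.pyRange 0 (min ((grid.length : Int) - r0) ((grid.headD []).length : Int)) 1).map (fun k =>
            pyCell (grid.map (fun row => PySem.List.slice row (some 0) (some ((grid.headD []).length : Int)))) (r0 + k) (((grid.headD []).length : Int) - 1 - k)))
    ++ (PySem.List.pyRange 0 (((grid.headD []).length : Int) - 1) 1).map (fun c0 =>
          (PySem.List.pyRange 0 (min ((grid.length : Int)) (c0 + 1)) 1).map (fun k =>
            pyCell (grid.map (fun row => PySem.List.slice row (some 0) (some ((grid.headD []).length : Int)))) k (c0 - k)))).flatMap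
    (fun line => (PySem.List.pyRange 0 ((line.length : Int) - L + 1) 1).map
      (fun i => windowProd line i L))

theorem foldl_max_flatMap {alpha : Type} (h : alpha → List Int) (l : List alpha) (a : Int) :
    l.foldl (fun acc r => (h r).foldl max acc) a = (l.flatMap h).foldl max a := by
  induction l generalizing a with
  | nil => simp
  | cons x xs ih => simp [List.foldl_append, ih]

theorem foldl_max_congr_mem (a : Int) (l1 l2 : List Int) (h : ∀ x, x ∈ l1 ↔ x ∈ l2) :
    l1.foldl max a = l2.foldl max a := by
  have bound : ∀ (u v : List Int), (∀ x, x ∈ u ↔ x ∈ v) → u.foldl max a ≤ v.foldl max a := by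
    intro u v huv
    rcases PySem.List.foldl_max_mem u a with he | he
    · rw [he]; exact (PySem.List.le_foldl_max v a).1
    · exact (PySem.List.le_foldl_max v a).2 _ ((huv _).mp he)
  exact le_antisymm (bound _ _ h) (bound _ _ fun x => (h x).symm)

theorem innerLoopA_snd (grid : List (List Int)) (row col dr dc : Int) (l : List Int) (p : Int) :
    (innerLoopA grid row col dr dc l p).2
      = l.all (fun i => is_valid_position (row + i * dr) (col + i * dc) grid) := by
  induction l generalizing p with
  | nil => simp [innerLoopA]
  | cons i rest ih =>
      simp only [innerLoopA, List.all_cons]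
      by_cases h : is_valid_position (row + i * dr) (col + i * dc) grid
      · simp [h, ih]
      · simp [h]

theorem innerLoopA_fst (grid : List (List Int)) (row col dr dc : Int) (l : List Int) (p : Int)
    (h : ∀ i ∈ l, is_valid_position (row + i * dr) (col + i * dc) grid = true) :
    (innerLoopA grid row col dr dc l p).1
      = l.foldl (fun q i => q * pyCell grid (row + i * dr) (col + i * dc)) p := by
  induction l generalizing p with
  | nil => simp [innerLoopA]
  | cons i rest ih =>
      simp only [innerLoopA, List.foldl_cons]
      rw [if_pos (h i (List.mem_cons_self ..))]
      exact ih _ fun j hj => h j (List.mem_cons_of_mem _ hj)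

theorem innerLoopA_val (grid : List (List Int)) (row col dr dc L : Int)
    (h : ∀ i : Int, 0 ≤ i → i < L → is_valid_position (row + i * dr) (col + i * dc) grid = true) :
    innerLoopA grid row col dr dc (PySem.List.pyRange 0 L 1) 1
      = (segProd grid dr dc row col L, true) := by
  have hmem : ∀ i ∈ PySem.List.pyRange 0 L 1,
      is_valid_position (row + i * dr) (col + i * dc) grid = true := by
    intro i hi
    rw [PySem.List.mem_pyRange_one] at hi
    exact h i hi.1 hi.2
  have h1 := innerLoopA_fst grid row col dr dc (PySem.List.pyRange 0 L 1) 1 hmem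
  have h2 := innerLoopA_snd grid row col dr dc (PySem.List.pyRange 0 L 1) 1
  rw [List.all_eq_true.2 hmem] at h2
  refine Prod.ext ?_ h2
  rw [h1]
  show _ = segProd grid dr dc row col L
  rw [segProd, PySem.List.pyRange_one, List.foldl_map]
  have : (L - 0).toNat = L.toNat := by omega
  rw [this]
  apply PySem.List.foldl_congr_mem
  intro acc k _
  simp

theorem foldl_max_map {alpha : Type} (f : alpha → Int) (l : List alpha) (a : Int) :
    l.foldl (fun acc i => max acc (f i)) a = (l.map f).foldl max a :=
  (List.foldl_map (f := f) (g := max) (l := l) (init := a)).symm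

theorem inner_cols_eq (grid : List (List Int)) (row dr dc L : Int) (cl : List Int) (mp : Int) :
    cl.foldl (fun mp col =>
        if (innerLoopA grid row col dr dc (PySem.List.pyRange 0 L 1) 1).2 = true
        then max mp (innerLoopA grid row col dr dc (PySem.List.pyRange 0 L 1) 1).1 else mp) mp
      = ((cl.filter (fun col => (innerLoopA grid row col dr dc (PySem.List.pyRange 0 L 1) 1).2)).map
          (fun col => (innerLoopA grid row col dr dc (PySem.List.pyRange 0 L 1) 1).1)).foldl max mp := by
  induction cl generalizing mp with
  | nil => rfl
  | cons c rest ih =>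
      simp only [List.foldl_cons, List.filter_cons]
      by_cases h : (innerLoopA grid row c dr dc (PySem.List.pyRange 0 L 1) 1).2 = true
      · simp only [h, if_true, List.map_cons, List.foldl_cons]
        exact ih _
      · simp only [h, if_false, Bool.false_eq_true]
        exact ih _

theorem solveA_eq (grid : List (List Int)) (L : Int)
    (h : ¬(grid = [] ∨ grid.headD [] = [])) :
    solve_optimized grid L = (LA grid L).foldl max 0 := by
  unfold solve_optimized
  rw [if_neg h]
  simp only [inner_cols_eq, foldl_max_flatMap, LA]

theorem solveB_eq (grid : List (List Int)) (L : Int)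
    (h : ¬(grid = [] ∨ grid.headD [] = [])) :
    solve_optimized_alt grid L = (LB grid L).foldl max 0 := by
  unfold solve_optimized_alt
  rw [if_neg h]
  simp only [foldl_max_map, foldl_max_flatMap, LB]

theorem windowProd_congr (line : List Int) (i L : Int) (grid : List (List Int)) (dr dc r c : Int)
    (h : ∀ k : Int, 0 ≤ k → k < L →
      (PySem.List.pyGet? line (i + k)).getD 0 = pyCell grid (r + k * dr) (c + k * dc)) :
    windowProd line i L = segProd grid dr dc r c L := by
  rw [windowProd, segProd, PySem.List.pyRange_one, List.foldl_map]
  have he : (i + L - i).toNat = L.toNat := by omega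
  rw [he]
  apply PySem.List.foldl_congr_mem
  intro acc k hk
  rw [List.mem_range] at hk
  have := h (k : Int) (by omega) (by omega)
  rw [this]

-- reading a truncated cell equals reading the original cell (column inside the first row's width)
theorem pyCell_trunc (grid : List (List Int)) (r c : Int) (hr : 0 ≤ r) (hc0 : 0 ≤ c)
    (hc : c < ((grid.headD []).length : Int)) :
    pyCell (grid.map (fun row =>
        PySem.List.slice row (some 0) (some ((grid.headD []).length : Int)))) r c
      = pyCell grid r c := by
  unfold pyCell
  rw [PySem.List.pyGet?_of_nonneg _ hr, PySem.List.pyGet?_of_nonneg _ hr, List.getElem?_map]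
  cases hg : grid[r.toNat]? with
  | none => simp
  | some row =>
      simp only [Option.map_some, Option.getD_some]
      rw [PySem.List.slice_zero_start, PySem.List.slice_to _ (by positivity)]
      rw [PySem.List.pyGet?_of_nonneg _ hc0, PySem.List.pyGet?_of_nonneg _ hc0]
      rw [List.getElem?_take, if_pos (by omega)]

theorem mem_flat_filter_map (br bc : Int) (P : Int → Int → Bool) (F : Int → Int → Int) (x : Int) :
    (x ∈ (PySem.List.pyRange 0 br 1).flatMap (fun r =>
        ((PySem.List.pyRange 0 bc 1).filter (P r)).map (F r)))
    ↔ ∃ r c : Int, (0 ≤ r ∧ r < br) ∧ (0 ≤ c ∧ c < bc) ∧ P r c = true ∧ x = F r c := by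
  simp only [List.mem_flatMap, List.mem_map, List.mem_filter, PySem.List.mem_pyRange_one]
  constructor
  · rintro ⟨r, hr, c, ⟨hc, hP⟩, hx⟩
    exact ⟨r, c, hr, hc, hP, hx.symm⟩
  · rintro ⟨r, c, hr, hc, hP, hx⟩
    exact ⟨r, hr, c, ⟨hc, hP⟩, hx.symm⟩

theorem mem_lines_flat (a b L x : Int) (lineF : Int → List Int) :
    (x ∈ ((PySem.List.pyRange a b 1).map lineF).flatMap (fun line =>
        (PySem.List.pyRange 0 ((line.length : Int) - L + 1) 1).map (fun i => windowProd line i L)))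
    ↔ ∃ t i : Int, (a ≤ t ∧ t < b) ∧
        (0 ≤ i ∧ i < ((lineF t).length : Int) - L + 1) ∧ x = windowProd (lineF t) i L := by
  simp only [List.flatMap_map, List.mem_flatMap, List.mem_map, PySem.List.mem_pyRange_one]
  constructor
  · rintro ⟨t, ht, i, hi, hx⟩
    exact ⟨t, i, ht, hi, hx.symm⟩
  · rintro ⟨t, i, ht, hi, hx⟩
    exact ⟨t, ht, i, hi, hx.symm⟩

theorem mem_rows_flat (L x : Int) (grid : List (List Int)) (f : List Int → List Int) :
    (x ∈ (grid.map f).flatMap (fun line =>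
        (PySem.List.pyRange 0 ((line.length : Int) - L + 1) 1).map (fun i => windowProd line i L)))
    ↔ ∃ n : Nat, ∃ hn : n < grid.length, ∃ i : Int,
        (0 ≤ i ∧ i < (((f grid[n]).length : Int) - L + 1)) ∧ x = windowProd (f grid[n]) i L := by
  simp only [List.flatMap_map, List.mem_flatMap, List.mem_map, PySem.List.mem_pyRange_one]
  constructor
  · rintro ⟨row, hrow, i, hi, hx⟩
    obtain ⟨n, hn, rfl⟩ := List.mem_iff_getElem.mp hrow
    exact ⟨n, hn, i, hi, hx.symm⟩
  · rintro ⟨n, hn, i, hi, hx⟩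
    exact ⟨grid[n], List.getElem_mem hn, i, hi, hx.symm⟩

theorem is_valid_iff (row col : Int) (grid : List (List Int)) :
    is_valid_position row col grid = true
      ↔ (0 ≤ row ∧ row < (grid.length : Int) ∧ 0 ≤ col ∧ col < ((grid.headD []).length : Int)) := by
  simp [is_valid_position]

theorem cand_iff (grid : List (List Int)) (r c dr dc L x : Int) :
    ((innerLoopA grid r c dr dc (PySem.List.pyRange 0 L 1) 1).2 = true
      ∧ x = (innerLoopA grid r c dr dc (PySem.List.pyRange 0 L 1) 1).1)
    ↔ ((∀ i : Int, 0 ≤ i → i < L → 0 ≤ r + i * dr ∧ r + i * dr < (grid.length : Int)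
          ∧ 0 ≤ c + i * dc ∧ c + i * dc < ((grid.headD []).length : Int))
        ∧ x = segProd grid dr dc r c L) := by
  constructor
  · rintro ⟨h2, h1⟩
    have hv : ∀ i : Int, 0 ≤ i → i < L →
        is_valid_position (r + i * dr) (c + i * dc) grid = true := by
      rw [innerLoopA_snd] at h2
      intro i hi0 hiL
      exact List.all_eq_true.mp h2 i (by rw [PySem.List.mem_pyRange_one]; exact ⟨hi0, hiL⟩)
    have hval := innerLoopA_val grid r c dr dc L hv
    refine ⟨fun i h0 hL => (is_valid_iff _ _ _).mp (hv i h0 hL), ?_⟩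
    rw [h1, hval]
  · rintro ⟨hval, hx⟩
    have hv : ∀ i : Int, 0 ≤ i → i < L →
        is_valid_position (r + i * dr) (c + i * dc) grid = true :=
      fun i h0 hL => (is_valid_iff _ _ _).mpr (hval i h0 hL)
    rw [innerLoopA_val grid r c dr dc L hv]
    exact ⟨rfl, hx⟩

-- A's candidate set for one direction, in arithmetic form
def Adir (grid : List (List Int)) (L x dr dc : Int) : Prop :=
  ∃ r c : Int,
    (0 ≤ r ∧ r < (grid.length : Int) - (L - 1) * max 0 dr)
    ∧ (0 ≤ c ∧ c < ((grid.headD []).length : Int) - (L - 1) * max 0 dc)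
    ∧ (∀ i : Int, 0 ≤ i → i < L → 0 ≤ r + i * dr ∧ r + i * dr < (grid.length : Int)
        ∧ 0 ≤ c + i * dc ∧ c + i * dc < ((grid.headD []).length : Int))
    ∧ x = segProd grid dr dc r c L

theorem memA_dir (grid : List (List Int)) (L x dr dc : Int) :
    (x ∈ (PySem.List.pyRange 0 ((grid.length : Int) - (L - 1) * max 0 dr) 1).flatMap (fun row =>
        ((PySem.List.pyRange 0 (((grid.headD []).length : Int) - (L - 1) * max 0 dc) 1).filter
          (fun col => (innerLoopA grid row col dr dc (PySem.List.pyRange 0 L 1) 1).2)).map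
          (fun col => (innerLoopA grid row col dr dc (PySem.List.pyRange 0 L 1) 1).1)))
    ↔ Adir grid L x dr dc := by
  rw [mem_flat_filter_map]
  unfold Adir
  apply exists_congr; intro r; apply exists_congr; intro c
  constructor
  · rintro ⟨hr, hc, hP, hx⟩
    have hv := (cand_iff grid r c dr dc L x).mp ⟨hP, hx⟩
    exact ⟨hr, hc, hv.1, hv.2⟩
  · rintro ⟨hr, hc, hval, hx⟩
    have hv := (cand_iff grid r c dr dc L x).mpr ⟨hval, hx⟩
    exact ⟨hr, hc, hv.1, hv.2⟩

theorem mem_LA (grid : List (List Int)) (L x : Int) :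
    x ∈ LA grid L
      ↔ (Adir grid L x 0 1 ∨ Adir grid L x 1 0 ∨ Adir grid L x 1 1 ∨ Adir grid L x 1 (-1)) := by
  unfold LA
  simp only [List.flatMap_cons, List.flatMap_nil, List.append_nil, List.mem_append]
  rw [memA_dir, memA_dir, memA_dir, memA_dir]

theorem segProd_nonpos (grid : List (List Int)) (dr dc r c L : Int) (h : L ≤ 0) :
    segProd grid dr dc r c L = 1 := by
  unfold segProd
  have : L.toNat = 0 := by omega
  rw [this]
  rfl

theorem mapline_window (m i L : Int) (f : Int → Int) (grid : List (List Int)) (dr dc r c : Int)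
    (hi : 0 ≤ i) (hu : i + L ≤ m)
    (hf : ∀ k : Int, 0 ≤ k → k < L → f (i + k) = pyCell grid (r + k * dr) (c + k * dc)) :
    windowProd ((PySem.List.pyRange 0 m 1).map f) i L = segProd grid dr dc r c L := by
  apply windowProd_congr
  intro k hk0 hkL
  rw [show (PySem.List.pyGet? ((PySem.List.pyRange 0 m 1).map f) (i + k)).getD 0
        = PySem.List.pyGetD ((PySem.List.pyRange 0 m 1).map f) (i + k) 0 from rfl]
  rw [PySem.List.pyGetD_map_pyRange_of_nonneg f m (i + k) 0 (by omega) (by omega)]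
  exact hf k hk0 hkL

theorem length_mapline (m : Int) (f : Int → Int) :
    ((((PySem.List.pyRange 0 m 1).map f).length : Nat) : Int) = max m 0 := by
  rw [PySem.List.pyRange_one]
  simp only [List.length_map, List.length_range]
  omega

theorem rowline_window (grid : List (List Int)) (n : Nat) (hn : n < grid.length)
    (i L : Int) (hi : 0 ≤ i)
    (hu : i + L ≤ ((grid.headD []).length : Int)) :
    windowProd (PySem.List.slice grid[n] (some 0) (some ((grid.headD []).length : Int))) i L
      = segProd grid 0 1 (n : Int) i L := by
  apply windowProd_congr
  intro k hk0 hkL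
  rw [PySem.List.slice_zero_start, PySem.List.slice_to _ (by positivity)]
  rw [PySem.List.pyGet?_of_nonneg _ (by omega), List.getElem?_take, if_pos (by omega)]
  unfold pyCell
  rw [show (n : Int) + k * 0 = (n : Int) by ring, show i + k * 1 = i + k by ring]
  rw [PySem.List.pyGet?_natCast, List.getElem?_eq_getElem hn]
  simp only [Option.getD_some]
  rw [PySem.List.pyGet?_of_nonneg _ (by omega)]

-- B's candidate sets, one per line family
def B1pred (grid : List (List Int)) (L x : Int) : Prop :=
  ∃ n : Nat, n < grid.length ∧ ∃ i : Int,
    0 ≤ i ∧ i < ((grid.headD []).length : Int) - L + 1 ∧ x = segProd grid 0 1 (n : Int) i L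
def B2pred (grid : List (List Int)) (L x : Int) : Prop :=
  ∃ c i : Int, (0 ≤ c ∧ c < ((grid.headD []).length : Int))
    ∧ (0 ≤ i ∧ i < (grid.length : Int) - L + 1) ∧ x = segProd grid 1 0 i c L
def B3pred (grid : List (List Int)) (L x : Int) : Prop :=
  ∃ r0 i : Int, (0 ≤ r0 ∧ r0 < (grid.length : Int))
    ∧ (0 ≤ i ∧ i < min ((grid.length : Int) - r0) ((grid.headD []).length : Int) - L + 1)
    ∧ x = segProd grid 1 1 (r0 + i) i L
def B4pred (grid : List (List Int)) (L x : Int) : Prop :=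
  ∃ c0 i : Int, (1 ≤ c0 ∧ c0 < ((grid.headD []).length : Int))
    ∧ (0 ≤ i ∧ i < min (grid.length : Int) (((grid.headD []).length : Int) - c0) - L + 1)
    ∧ x = segProd grid 1 1 i (c0 + i) L
def B5pred (grid : List (List Int)) (L x : Int) : Prop :=
  ∃ r0 i : Int, (0 ≤ r0 ∧ r0 < (grid.length : Int))
    ∧ (0 ≤ i ∧ i < min ((grid.length : Int) - r0) ((grid.headD []).length : Int) - L + 1)
    ∧ x = segProd grid 1 (-1) (r0 + i) (((grid.headD []).length : Int) - 1 - i) L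
def B6pred (grid : List (List Int)) (L x : Int) : Prop :=
  ∃ c0 i : Int, (0 ≤ c0 ∧ c0 < ((grid.headD []).length : Int) - 1)
    ∧ (0 ≤ i ∧ i < min (grid.length : Int) (c0 + 1) - L + 1)
    ∧ x = segProd grid 1 (-1) i (c0 - i) L

theorem mem_LB (grid : List (List Int)) (L x : Int)
    (hpre : ∀ row ∈ grid, (grid.headD []).length ≤ row.length) :
    x ∈ LB grid L
      ↔ (B1pred grid L x ∨ B2pred grid L x ∨ B3pred grid L x ∨ B4pred grid L x
          ∨ B5pred grid L x ∨ B6pred grid L x) := by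
  unfold LB
  simp only [List.flatMap_append, List.mem_append]
  rw [mem_rows_flat, mem_lines_flat, mem_lines_flat, mem_lines_flat, mem_lines_flat,
    mem_lines_flat]
  constructor
  · rintro (((((h | h) | h) | h) | h) | h)
    -- segment 1: rows
    · obtain ⟨n, hn, i, ⟨hi0, hiu⟩, hx⟩ := h
      have hmem := hpre grid[n] (List.getElem_mem hn)
      have hlen : (((PySem.List.slice grid[n] (some 0)
          (some ((grid.headD []).length : Int))).length : Nat) : Int)
          = ((grid.headD []).length : Int) := by
        rw [PySem.List.slice_zero_start, PySem.List.slice_to _ (by positivity)]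
        simp only [List.length_take]
        omega
      rw [hlen] at hiu
      refine Or.inl ⟨n, hn, i, hi0, hiu, ?_⟩
      rw [hx]
      exact rowline_window grid n hn i L hi0 (by omega)
    -- segment 2: columns
    · obtain ⟨t, i, ht, ⟨hi0, hiu⟩, hx⟩ := h
      rw [length_mapline] at hiu
      refine Or.inr (Or.inl ⟨t, i, ht, ⟨hi0, by omega⟩, ?_⟩)
      rw [hx]
      apply mapline_window _ _ _ _ _ _ _ _ _ hi0 (by omega)
      intro k hk0 hkL
      rw [pyCell_trunc grid (i + k) t (by omega) ht.1 ht.2]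
      rw [show i + k * 1 = i + k by ring, show t + k * 0 = t by ring]
    -- segment 3: down-right diagonals starting in column 0
    · obtain ⟨t, i, ht, ⟨hi0, hiu⟩, hx⟩ := h
      rw [length_mapline] at hiu
      refine Or.inr (Or.inr (Or.inl ⟨t, i, ht, ⟨hi0, by omega⟩, ?_⟩))
      rw [hx]
      apply mapline_window _ _ _ _ _ _ _ _ _ hi0 (by omega)
      intro k hk0 hkL
      rw [pyCell_trunc grid (t + (i + k)) (i + k) (by omega) (by omega) (by omega)]
      rw [show t + i + k * 1 = t + (i + k) by ring, show i + k * 1 = i + k by ring]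
    -- segment 4: down-right diagonals starting in row 0
    · obtain ⟨t, i, ht, ⟨hi0, hiu⟩, hx⟩ := h
      rw [length_mapline] at hiu
      refine Or.inr (Or.inr (Or.inr (Or.inl ⟨t, i, ht, ⟨hi0, by omega⟩, ?_⟩)))
      rw [hx]
      apply mapline_window _ _ _ _ _ _ _ _ _ hi0 (by omega)
      intro k hk0 hkL
      rw [pyCell_trunc grid (i + k) (t + (i + k)) (by omega) (by omega) (by omega)]
      rw [show i + k * 1 = i + k by ring, show t + i + k * 1 = t + (i + k) by ring]
    -- segment 5: down-left diagonals starting in the last column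
    · obtain ⟨t, i, ht, ⟨hi0, hiu⟩, hx⟩ := h
      rw [length_mapline] at hiu
      refine Or.inr (Or.inr (Or.inr (Or.inr (Or.inl ⟨t, i, ht, ⟨hi0, by omega⟩, ?_⟩))))
      rw [hx]
      apply mapline_window _ _ _ _ _ _ _ _ _ hi0 (by omega)
      intro k hk0 hkL
      rw [pyCell_trunc grid (t + (i + k)) (((grid.headD []).length : Int) - 1 - (i + k))
        (by omega) (by omega) (by omega)]
      rw [show t + i + k * 1 = t + (i + k) by ring,
        show ((grid.headD []).length : Int) - 1 - i + k * (-1)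
          = ((grid.headD []).length : Int) - 1 - (i + k) by ring]
    -- segment 6: down-left diagonals starting in row 0
    · obtain ⟨t, i, ht, ⟨hi0, hiu⟩, hx⟩ := h
      rw [length_mapline] at hiu
      refine Or.inr (Or.inr (Or.inr (Or.inr (Or.inr ⟨t, i, ⟨ht.1, by omega⟩, ⟨hi0, by omega⟩, ?_⟩))))
      rw [hx]
      apply mapline_window _ _ _ _ _ _ _ _ _ hi0 (by omega)
      intro k hk0 hkL
      rw [pyCell_trunc grid (i + k) (t - (i + k)) (by omega) (by omega) (by omega)]
      rw [show i + k * 1 = i + k by ring, show t - i + k * (-1) = t - (i + k) by ring]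
  · rintro (h | h | h | h | h | h)
    · obtain ⟨n, hn, i, hi0, hiu, hx⟩ := h
      have hmem := hpre grid[n] (List.getElem_mem hn)
      have hlen : (((PySem.List.slice grid[n] (some 0)
          (some ((grid.headD []).length : Int))).length : Nat) : Int)
          = ((grid.headD []).length : Int) := by
        rw [PySem.List.slice_zero_start, PySem.List.slice_to _ (by positivity)]
        simp only [List.length_take]
        omega
      refine Or.inl (Or.inl (Or.inl (Or.inl (Or.inl ⟨n, hn, i, ⟨hi0, by omega⟩, ?_⟩))))
      rw [hx]
      exact (rowline_window grid n hn i L hi0 (by omega)).symm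
    · obtain ⟨t, i, ht, ⟨hi0, hiu⟩, hx⟩ := h
      refine Or.inl (Or.inl (Or.inl (Or.inl (Or.inr ⟨t, i, ht, ⟨hi0, ?_⟩, ?_⟩))))
      · rw [length_mapline]; omega
      rw [hx]
      symm
      apply mapline_window _ _ _ _ _ _ _ _ _ hi0 (by omega)
      intro k hk0 hkL
      rw [pyCell_trunc grid (i + k) t (by omega) ht.1 ht.2]
      rw [show i + k * 1 = i + k by ring, show t + k * 0 = t by ring]
    · obtain ⟨t, i, ht, ⟨hi0, hiu⟩, hx⟩ := h
      refine Or.inl (Or.inl (Or.inl (Or.inr ⟨t, i, ht, ⟨hi0, ?_⟩, ?_⟩)))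
      · rw [length_mapline]; omega
      rw [hx]
      symm
      apply mapline_window _ _ _ _ _ _ _ _ _ hi0 (by omega)
      intro k hk0 hkL
      rw [pyCell_trunc grid (t + (i + k)) (i + k) (by omega) (by omega) (by omega)]
      rw [show t + i + k * 1 = t + (i + k) by ring, show i + k * 1 = i + k by ring]
    · obtain ⟨t, i, ht, ⟨hi0, hiu⟩, hx⟩ := h
      refine Or.inl (Or.inl (Or.inr ⟨t, i, ht, ⟨hi0, ?_⟩, ?_⟩))
      · rw [length_mapline]; omega
      rw [hx]
      symm
      apply mapline_window _ _ _ _ _ _ _ _ _ hi0 (by omega)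
      intro k hk0 hkL
      rw [pyCell_trunc grid (i + k) (t + (i + k)) (by omega) (by omega) (by omega)]
      rw [show i + k * 1 = i + k by ring, show t + i + k * 1 = t + (i + k) by ring]
    · obtain ⟨t, i, ht, ⟨hi0, hiu⟩, hx⟩ := h
      refine Or.inl (Or.inr ⟨t, i, ht, ⟨hi0, ?_⟩, ?_⟩)
      · rw [length_mapline]; omega
      rw [hx]
      symm
      apply mapline_window _ _ _ _ _ _ _ _ _ hi0 (by omega)
      intro k hk0 hkL
      rw [pyCell_trunc grid (t + (i + k)) (((grid.headD []).length : Int) - 1 - (i + k))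
        (by omega) (by omega) (by omega)]
      rw [show t + i + k * 1 = t + (i + k) by ring,
        show ((grid.headD []).length : Int) - 1 - i + k * (-1)
          = ((grid.headD []).length : Int) - 1 - (i + k) by ring]
    · obtain ⟨t, i, ht, ⟨hi0, hiu⟩, hx⟩ := h
      refine Or.inr ⟨t, i, ⟨ht.1, by omega⟩, ⟨hi0, ?_⟩, ?_⟩
      · rw [length_mapline]; omega
      rw [hx]
      symm
      apply mapline_window _ _ _ _ _ _ _ _ _ hi0 (by omega)
      intro k hk0 hkL
      rw [pyCell_trunc grid (i + k) (t - (i + k)) (by omega) (by omega) (by omega)]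
      rw [show i + k * 1 = i + k by ring, show t - i + k * (-1) = t - (i + k) by ring]

theorem pred_iff (grid : List (List Int)) (L x : Int)
    (hR : 0 < grid.length) (hC : 0 < (grid.headD []).length) :
    (Adir grid L x 0 1 ∨ Adir grid L x 1 0 ∨ Adir grid L x 1 1 ∨ Adir grid L x 1 (-1))
    ↔ (B1pred grid L x ∨ B2pred grid L x ∨ B3pred grid L x ∨ B4pred grid L x
        ∨ B5pred grid L x ∨ B6pred grid L x) := by
  simp only [Adir, B1pred, B2pred, B3pred, B4pred, B5pred, B6pred,
    (by decide : max (0 : Int) 1 = 1), (by decide : max (0 : Int) 0 = 0),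
    (by decide : max (0 : Int) (-1) = 0), mul_zero, mul_one, mul_neg_one, add_zero, sub_zero]
  by_cases hL1 : 1 ≤ L
  · constructor
    · rintro (⟨r, c, hr, hc, hval, hx⟩ | ⟨r, c, hr, hc, hval, hx⟩ | ⟨r, c, hr, hc, hval, hx⟩ |
        ⟨r, c, hr, hc, hval, hx⟩)
      · refine Or.inl ⟨r.toNat, by omega, c, hc.1, by omega, ?_⟩
        rw [show ((r.toNat : Nat) : Int) = r by omega]
        exact hx
      · exact Or.inr (Or.inl ⟨c, r, hc, ⟨hr.1, by omega⟩, hx⟩)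
      · by_cases hcr : c ≤ r
        · refine Or.inr (Or.inr (Or.inl ⟨r - c, c, ⟨by omega, by omega⟩, ⟨hc.1, by omega⟩, ?_⟩))
          rw [show r - c + c = r by ring]
          exact hx
        · refine Or.inr (Or.inr (Or.inr (Or.inl
            ⟨c - r, r, ⟨by omega, by omega⟩, ⟨hr.1, by omega⟩, ?_⟩)))
          rw [show c - r + r = c by ring]
          exact hx
      · have hc2 : L - 1 ≤ c := by
          have := hval (L - 1) (by omega) (by omega)
          omega
        by_cases hk : ((grid.headD []).length : Int) - 1 ≤ r + c
        · refine Or.inr (Or.inr (Or.inr (Or.inr (Or.inl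
            ⟨r - (((grid.headD []).length : Int) - 1 - c), ((grid.headD []).length : Int) - 1 - c,
              ⟨by omega, by omega⟩, ⟨by omega, by omega⟩, ?_⟩))))
          rw [show r - (((grid.headD []).length : Int) - 1 - c)
                + (((grid.headD []).length : Int) - 1 - c) = r by ring,
            show ((grid.headD []).length : Int) - 1 - (((grid.headD []).length : Int) - 1 - c)
                = c by ring]
          exact hx
        · refine Or.inr (Or.inr (Or.inr (Or.inr (Or.inr
            ⟨r + c, r, ⟨by omega, by omega⟩, ⟨hr.1, by omega⟩, ?_⟩))))
          rw [show r + c - r = c by ring]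
          exact hx
    · rintro (⟨n, hn, i, hi0, hiu, hx⟩ | ⟨c, i, hc, hi, hx⟩ | ⟨r0, i, hr0, hi, hx⟩ |
        ⟨c0, i, hc0, hi, hx⟩ | ⟨r0, i, hr0, hi, hx⟩ | ⟨c0, i, hc0, hi, hx⟩)
      · refine Or.inl ⟨(n : Int), i, ⟨by omega, by omega⟩, ⟨hi0, by omega⟩, ?_, hx⟩
        intro j hj0 hjL
        exact ⟨by omega, by omega, by omega, by omega⟩
      · refine Or.inr (Or.inl ⟨i, c, ⟨hi.1, by omega⟩, hc, ?_, hx⟩)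
        intro j hj0 hjL
        exact ⟨by omega, by omega, by omega, by omega⟩
      · refine Or.inr (Or.inr (Or.inl ⟨r0 + i, i, ⟨by omega, by omega⟩, ⟨hi.1, by omega⟩, ?_, hx⟩))
        intro j hj0 hjL
        exact ⟨by omega, by omega, by omega, by omega⟩
      · refine Or.inr (Or.inr (Or.inl ⟨i, c0 + i, ⟨hi.1, by omega⟩, ⟨by omega, by omega⟩, ?_, hx⟩))
        intro j hj0 hjL
        exact ⟨by omega, by omega, by omega, by omega⟩
      · refine Or.inr (Or.inr (Or.inr ⟨r0 + i, ((grid.headD []).length : Int) - 1 - i,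
          ⟨by omega, by omega⟩, ⟨by omega, by omega⟩, ?_, hx⟩))
        intro j hj0 hjL
        exact ⟨by omega, by omega, by omega, by omega⟩
      · refine Or.inr (Or.inr (Or.inr ⟨i, c0 - i,
          ⟨by omega, by omega⟩, ⟨by omega, by omega⟩, ?_, hx⟩))
        intro j hj0 hjL
        exact ⟨by omega, by omega, by omega, by omega⟩
  · have h1 : ∀ dr dc r c : Int, segProd grid dr dc r c L = 1 := fun dr dc r c =>
      segProd_nonpos grid dr dc r c L (by omega)
    constructor
    · rintro (⟨r, c, -, -, -, hx⟩ | ⟨r, c, -, -, -, hx⟩ | ⟨r, c, -, -, -, hx⟩ |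
        ⟨r, c, -, -, -, hx⟩) <;>
      · rw [h1] at hx
        exact Or.inl ⟨0, by omega, 0, by omega, by omega, by rw [h1]; exact hx⟩
    · rintro (⟨n, -, i, -, -, hx⟩ | ⟨c, i, -, -, hx⟩ | ⟨r0, i, -, -, hx⟩ | ⟨c0, i, -, -, hx⟩ |
        ⟨r0, i, -, -, hx⟩ | ⟨c0, i, -, -, hx⟩) <;>
      · rw [h1] at hx
        exact Or.inl ⟨0, 0, ⟨le_refl 0, by omega⟩, ⟨le_refl 0, by omega⟩,
          fun i h0 hiL => absurd hiL (by omega), by rw [h1]; exact hx⟩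

theorem solve_optimized_spec : Claim_equal_solve_optimized := by
  intro grid length hdom hpre
  unfold Spec_solve_optimized
  unfold Pre_solve_optimized at hpre
  by_cases hg : grid = [] ∨ grid.headD [] = []
  · unfold solve_optimized solve_optimized_alt
    rw [if_pos hg, if_pos hg]
  · rw [solveA_eq grid length hg, solveB_eq grid length hg]
    apply foldl_max_congr_mem
    intro x
    push Not at hg
    rw [mem_LA, mem_LB grid length x hpre]
    exact pred_iff grid length x (List.length_pos_iff.mpr hg.1)
      (List.length_pos_iff.mpr hg.2)
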